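-- pv_equiv track=rewrite | github.com/Xinyu0423/Leetcode-Note | dp_question.py | dp_question
-- ===== SOURCE A (Python) =====
-- def dp_question(nums):
--     if not nums:
--         return 0
--     dp=[1 for _ in range(len(nums))]
--     for i in range(1,len(nums)):
--         for j in range(i):
--             if nums[j]+1==nums[i]:
--                 dp[i]=dp[j]+1
--     return max(dp)
-- ===== SOURCE B (Python) =====
-- def dp_question(nums):
--     last = {}   # value -> dp of its last occurrence so far
--     best = 0
--     for x in nums:
--         d = last.get(x - 1, 0) + 1
--         last[x] = d
--         if d > best:
--             best = d
--     return best
-- ===== Notes on version B (the rewrite author's own statement) =====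
-- stated objective: faster
-- what changed: Replaced the quadratic nested scan for the last consecutive predecessor with a single pass keeping a dict from value to the dp of its last occurrence and a running maximum.
import Mathlib
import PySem

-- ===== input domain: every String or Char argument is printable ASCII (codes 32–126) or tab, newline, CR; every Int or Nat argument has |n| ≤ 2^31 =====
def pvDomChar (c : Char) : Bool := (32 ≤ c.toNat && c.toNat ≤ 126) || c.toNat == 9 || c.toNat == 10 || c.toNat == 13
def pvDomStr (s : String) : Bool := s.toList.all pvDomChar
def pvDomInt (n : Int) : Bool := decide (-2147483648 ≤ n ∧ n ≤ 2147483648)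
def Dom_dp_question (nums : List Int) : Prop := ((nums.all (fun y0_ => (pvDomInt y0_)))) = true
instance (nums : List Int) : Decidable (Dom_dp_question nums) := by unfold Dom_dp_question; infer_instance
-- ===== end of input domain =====

-- B replaces A's O(n^2) nested scan for the last consecutive predecessor by a single
-- pass with a dict (value -> dp of its last occurrence) and a running maximum (objective: faster, asymptotic).

-- ===== PORT A =====
-- Literal port of A. All indices i, j are nonnegative and in range, so List.getD is
-- exact for Python's nums[i]/dp[j]; range(1, n) is List.range' 1 (n-1); max(dp) is PySem.List.max?.
def dp_question (nums : List Int) : Int :=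
  if nums = [] then 0
  else
    let n := nums.length
    let dp0 : List Int := (List.range n).map (fun _ => (1 : Int))
    let dpf := (List.range' 1 (n - 1)).foldl
      (fun dp i =>
        (List.range i).foldl
          (fun dp j =>
            if nums.getD j 0 + 1 = nums.getD i 0 then
              dp.set i (dp.getD j 0 + 1)
            else dp)
          dp)
      dp0
    match PySem.List.max? dpf (fun y => y) with
    | some m => m
    | none => 0

-- ===== PORT B =====
-- Literal port of Source B: one fold over nums carrying (last : dict, best : running max).
def dp_question_alt (nums : List Int) : Int :=
  (nums.foldl
    (fun (st : PySem.Dict Int Int × Int) x =>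
      let d := st.1.getD (x - 1) 0 + 1
      (st.1.insert x d, if d > st.2 then d else st.2))
    (PySem.Dict.empty, 0)).2

-- ===== PRECONDITION & SPEC =====
def Spec_dp_question (nums : List Int) (out : Int) : Prop := out = dp_question_alt nums
instance (nums : List Int) (out : Int) : Decidable (Spec_dp_question nums out) := by unfold Spec_dp_question; infer_instance

-- ===== CLAIM (what is proved, stated in full; the proofs are below) =====
def Claim_equal_dp_question : Prop := ∀ (nums : List Int), Dom_dp_question nums → Spec_dp_question nums (dp_question nums)

-- ===== LEMMAS AND PROOFS =====

-- The common spec: dp values of all positions, computed left to right; `ps` is the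
-- list of (value, dp-value) pairs of the already processed prefix, MOST RECENT FIRST,
-- so that `List.lookup` finds the last occurrence.
def dvAux : List Int → List (Int × Int) → List Int
  | [], _ => []
  | x :: xs, ps =>
    let v := ((ps.lookup (x - 1)).getD 0) + 1
    v :: dvAux xs ((x, v) :: ps)

lemma dvAux_length (xs : List Int) (ps : List (Int × Int)) : (dvAux xs ps).length = xs.length := by
  induction xs generalizing ps with
  | nil => rfl
  | cons x xs ih => simp [dvAux, ih]

-- reversed prefix pairs of the first i positions (most recent first), on top of ps
def revpref (xs : List Int) (ps : List (Int × Int)) : Nat → List (Int × Int)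
  | 0 => ps
  | i + 1 => (xs.getD i 0, (dvAux xs ps).getD i 0) :: revpref xs ps i

lemma revpref_cons (x : Int) (xs : List Int) (ps : List (Int × Int)) (i : Nat) :
    revpref (x :: xs) ps (i + 1) =
      revpref xs ((x, ((ps.lookup (x - 1)).getD 0) + 1) :: ps) i := by
  induction i with
  | zero => simp [revpref, dvAux]
  | succ i ih =>
    show ((x :: xs).getD (i + 1) 0, (dvAux (x :: xs) ps).getD (i + 1) 0) :: revpref (x :: xs) ps (i + 1) = _
    rw [ih]
    simp [revpref, dvAux]

-- index-wise characterisation of dvAux: position i is 1 + the dp-value of the last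
-- earlier occurrence of xs[i] - 1 (0 if none)
lemma dvAux_char (xs : List Int) (ps : List (Int × Int)) (i : Nat) (h : i < xs.length) :
    (dvAux xs ps).getD i 0 =
      (((revpref xs ps i).lookup (xs.getD i 0 - 1)).getD 0) + 1 := by
  induction xs generalizing ps i with
  | nil => simp at h
  | cons x xs ih =>
    cases i with
    | zero => simp [dvAux, revpref]
    | succ i =>
      have h' : i < xs.length := by simpa using h
      simp only [dvAux, List.getD_cons_succ, revpref_cons]
      exact ih _ i h'

-- ===== A-side =====

-- the dp list after the first k positions hold their final values and the rest are still 1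
def dpAt (nums : List Int) (k : Nat) : List Int :=
  (dvAux nums []).take k ++ List.replicate (nums.length - k) 1

-- entries below i of dpAt are the dv values
lemma dpAt_getD_lt (nums : List Int) (k j : Nat) (hj : j < k) (hjn : j < nums.length) :
    (dpAt nums k).getD j 0 = (dvAux nums []).getD j 0 := by
  have hlen : j < ((dvAux nums []).take k).length := by
    simp [dvAux_length]; omega
  rw [dpAt]
  simp only [List.getD]
  rw [List.getElem?_append_left hlen, List.getElem?_take_of_lt hj]

-- the reversed prefix pairs read off a dp list agreeing with dv below m
def rps (nums : List Int) (dp : List Int) : Nat → List (Int × Int)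
  | 0 => []
  | m + 1 => (nums.getD m 0, dp.getD m 0) :: rps nums dp m

lemma rps_eq_revpref (nums dp : List Int) (m : Nat)
    (h : ∀ j < m, dp.getD j 0 = (dvAux nums []).getD j 0) :
    rps nums dp m = revpref nums [] m := by
  induction m with
  | zero => rfl
  | succ m ih =>
    simp only [rps, revpref, h m (by omega)]
    rw [ih (fun j hj => h j (by omega))]

-- getD of a set at a different index (helper for inner_loop)
lemma getD_set_ne (l : List Int) (n m : Nat) (a d : Int) (h : n ≠ m) :
    (l.set m a).getD n d = l.getD n d := by
  simp [List.getD, List.getElem?_set_ne (by omega : m ≠ n)]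

-- one inner loop: folding j over range m writes into slot i the dp-value of the
-- last j < m with nums[j] + 1 = nums[i] (plus one), and touches nothing else
lemma inner_loop (nums : List Int) (i m : Nat) (dp : List Int) (hmi : m ≤ i) :
    (List.range m).foldl
      (fun dp j =>
        if nums.getD j 0 + 1 = nums.getD i 0 then
          dp.set i (dp.getD j 0 + 1)
        else dp)
      dp =
    (match (rps nums dp m).lookup (nums.getD i 0 - 1) with
     | some w => dp.set i (w + 1)
     | none => dp) := by
  induction m with
  | zero => simp [rps]
  | succ m ih =>
    rw [List.range_succ, List.foldl_append]
    rw [ih (by omega)]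
    have hmne : m ≠ i := by omega
    simp only [rps, List.lookup, List.foldl_cons, List.foldl_nil]
    by_cases hc : nums.getD m 0 + 1 = nums.getD i 0
    · have hkey : ((nums.getD i 0 - 1) == nums.getD m 0) = true := by
        rw [Bool.beq_eq_decide_eq, decide_eq_true_eq]; omega
      rw [hkey]
      cases hlk : (rps nums dp m).lookup (nums.getD i 0 - 1) with
      | none => simp only [if_pos hc]
      | some w => simp only [if_pos hc, getD_set_ne _ _ _ _ _ hmne, List.set_set]
    · have hkey : ((nums.getD i 0 - 1) == nums.getD m 0) = false := by
        rw [Bool.beq_eq_decide_eq, decide_eq_false_iff_not]; omega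
      rw [hkey]
      cases hlk : (rps nums dp m).lookup (nums.getD i 0 - 1) <;> simp only [if_neg hc]

-- setting the slot just after a prefix
lemma set_append_len (A B : List Int) (b v : Int) (i : Nat) (h : A.length = i) :
    (A ++ b :: B).set i v = A ++ v :: B := by
  subst h
  rw [List.set_append_right _ _ (le_refl _)]
  simp

-- one outer step advances dpAt by one
lemma outer_step (nums : List Int) (i : Nat) (hi : i < nums.length) :
    (List.range i).foldl
      (fun dp j =>
        if nums.getD j 0 + 1 = nums.getD i 0 then
          dp.set i (dp.getD j 0 + 1)
        else dp)
      (dpAt nums i) = dpAt nums (i + 1) := by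
  have hdv : (dvAux nums []).length = nums.length := dvAux_length nums []
  have hlt : ∀ j < i, (dpAt nums i).getD j 0 = (dvAux nums []).getD j 0 :=
    fun j hj => dpAt_getD_lt nums i j hj (by omega)
  rw [inner_loop nums i i (dpAt nums i) (le_refl i),
      rps_eq_revpref nums (dpAt nums i) i hlt]
  have hchar := dvAux_char nums [] i hi
  have htake : (dvAux nums []).take (i + 1)
      = (dvAux nums []).take i ++ [(dvAux nums []).getD i 0] := by
    rw [List.take_add_one]
    have : (dvAux nums [])[i]? = some ((dvAux nums []).getD i 0) := by
      simp [List.getD, List.getElem?_eq_getElem (by omega : i < (dvAux nums []).length)]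
    rw [this]
    rfl
  have hlenTake : ((dvAux nums []).take i).length = i := by
    simp [hdv]; omega
  have hrep : nums.length - i = (nums.length - (i + 1)) + 1 := by omega
  cases hlk : (revpref nums [] i).lookup (nums.getD i 0 - 1) with
  | none =>
    have hv1 : (dvAux nums []).getD i 0 = 1 := by rw [hchar, hlk]; rfl
    dsimp only
    unfold dpAt
    rw [htake, hrep, List.replicate_succ, hv1, List.append_assoc]
    rfl
  | some w =>
    have hvw : (dvAux nums []).getD i 0 = w + 1 := by rw [hchar, hlk]; rfl
    dsimp only
    unfold dpAt
    rw [hrep, List.replicate_succ, set_append_len _ _ _ _ i hlenTake]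
    rw [htake, hvw, List.append_assoc]
    rfl

-- the whole outer loop
lemma outer_loop (nums : List Int) (m : Nat) (hm : m ≤ nums.length - 1) (hne : nums ≠ []) :
    (List.range' 1 m).foldl
      (fun dp i =>
        (List.range i).foldl
          (fun dp j =>
            if nums.getD j 0 + 1 = nums.getD i 0 then
              dp.set i (dp.getD j 0 + 1)
            else dp)
          dp)
      (dpAt nums 1) = dpAt nums (m + 1) := by
  induction m with
  | zero => rfl
  | succ m ih =>
    rw [List.range'_1_concat, List.foldl_append, ih (by omega)]
    simp only [List.foldl_cons, List.foldl_nil, Nat.add_comm 1 m]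
    exact outer_step nums (m + 1) (by have := List.length_pos_of_ne_nil hne; omega)

-- dpAt 1 is the all-ones initial list
lemma dpAt_one (nums : List Int) (hne : nums ≠ []) :
    dpAt nums 1 = (List.range nums.length).map (fun _ => (1 : Int)) := by
  cases nums with
  | nil => exact absurd rfl hne
  | cons x t =>
    show ((1 : Int) :: dvAux t [(x, 1)]).take 1 ++ List.replicate ((x :: t).length - 1) 1 = _
    simp only [List.map_const', List.length_range, List.take_succ_cons, List.take_zero,
      List.length_cons, Nat.add_sub_cancel]
    rfl

-- ===== B-side =====

lemma b_fold (xs : List Int) (d : PySem.Dict Int Int) (ps : List (Int × Int)) (m : Int)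
    (h : ∀ k, d.getD k 0 = (ps.lookup k).getD 0) :
    (xs.foldl
      (fun (st : PySem.Dict Int Int × Int) x =>
        let v := st.1.getD (x - 1) 0 + 1
        (st.1.insert x v, if v > st.2 then v else st.2))
      (d, m)).2 =
    (dvAux xs ps).foldl (fun m v => if v > m then v else m) m := by
  induction xs generalizing d ps m with
  | nil => rfl
  | cons x xs ih =>
    simp only [List.foldl_cons, dvAux, h (x - 1)]
    apply ih
    intro k
    rw [PySem.Dict.getD_insert]
    simp only [List.lookup]
    rw [Bool.beq_eq_decide_eq]
    by_cases hk : k = x <;> simp [hk, h k]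

-- running max with > IS max
lemma rmax_eq_max : (fun (m v : Int) => if v > m then v else m) = max := by
  funext m v
  rcases lt_or_ge m v with h | h
  · simp [h, max_eq_right (le_of_lt h)]
  · simp [not_lt.mpr h, max_eq_left h]

-- ===== VERDICT (by name: the statement is the Claim_ definition above) =====
theorem dp_question_spec : Claim_equal_dp_question := by
  intro nums _
  unfold Spec_dp_question
  cases hnil : nums with
  | nil => rfl
  | cons x t =>
    have hne : nums ≠ [] := by simp [hnil]
    have hpos : 0 < nums.length := List.length_pos_of_ne_nil hne
    rw [← hnil]
    unfold dp_question dp_question_alt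
    rw [if_neg hne]
    rw [b_fold nums PySem.Dict.empty [] 0 (fun k => by simp)]
    dsimp only
    rw [← dpAt_one nums hne, outer_loop nums (nums.length - 1) (le_refl _) hne]
    have hn : nums.length - 1 + 1 = nums.length := by omega
    have hdv : (dvAux nums []).length = nums.length := dvAux_length nums []
    have hdpn : dpAt nums nums.length = dvAux nums [] := by
      unfold dpAt
      simp [hdv]
    rw [hn, hdpn]
    have hdvc : dvAux nums [] = 1 :: dvAux t [(x, 1)] := by rw [hnil]; rfl
    rw [hdvc, PySem.List.max?_id_cons]
    dsimp only
    simp only [List.foldl_cons]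
    rw [rmax_eq_max]
    norm_num
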